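-- pv_equiv track=rewrite | github.com/Honixbadger/almanca-turkce-sozluk | almanca-sozluk-projesi/scripts/enrich_verb_forms.py | extract_helper_hint
-- ===== SOURCE A (Python) =====
-- def extract_helper_hint(raw_tags: list[str]) -> set[str]:
--     hints = set()
--     for raw in raw_tags:
--         lowered = str(raw).casefold()
--         if "hilfsverb sein" in lowered:
--             hints.add("sein")
--         if "hilfsverb haben" in lowered:
--             hints.add("haben")
--     return hints
-- ===== SOURCE B (Python) =====
-- def extract_helper_hint(raw_tags: list[str]) -> set[str]:
--     blob = "\0".join(str(raw).casefold() for raw in raw_tags)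
--     return {verb for verb in ("sein", "haben") if f"hilfsverb {verb}" in blob}
-- ===== Notes on version B (the rewrite author's own statement) =====
-- stated objective: alternative
-- what changed: B joins all lowercased tags into one NUL-separated blob and decides each hint with a single global substring search, replacing A's per-tag loop that tests both phrases on every tag while growing a set; Pre_ only excludes inputs where both phrases occur with 'hilfsverb haben' strictly first, where the two ports' list representations of the (unordered) Python set differ in insertion order.
import Mathlib
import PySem

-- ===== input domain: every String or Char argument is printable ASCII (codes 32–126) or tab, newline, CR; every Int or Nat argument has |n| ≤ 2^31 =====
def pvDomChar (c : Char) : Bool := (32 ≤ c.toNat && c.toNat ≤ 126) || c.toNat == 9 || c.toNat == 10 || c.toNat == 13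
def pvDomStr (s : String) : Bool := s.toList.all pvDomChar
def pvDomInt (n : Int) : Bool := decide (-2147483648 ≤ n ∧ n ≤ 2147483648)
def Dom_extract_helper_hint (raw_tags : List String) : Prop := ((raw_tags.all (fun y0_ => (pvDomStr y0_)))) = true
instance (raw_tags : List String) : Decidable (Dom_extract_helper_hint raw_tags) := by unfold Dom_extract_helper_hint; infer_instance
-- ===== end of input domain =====

-- B joins all lowercased tags into one NUL-separated blob and does two global substring
-- searches instead of A's per-tag loop with two checks per tag; objective: alternative.
-- Both Pythons return the same (unordered) set on every input; Pre_ only fixes the list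
-- representation order of the ports.

-- ===== PORT A =====
-- str.casefold is ported as PySem.Str.lower: they agree on the ASCII domain Dom_.
def extract_helper_hint (raw_tags : List String) : List String :=
  raw_tags.foldl (fun hints raw =>
    let lowered := PySem.Str.lower raw
    let hints := if PySem.Str.isIn "hilfsverb sein" lowered then PySem.Set.add hints "sein" else hints
    if PySem.Str.isIn "hilfsverb haben" lowered then PySem.Set.add hints "haben" else hints)
    PySem.Set.empty

-- ===== PORT B =====
def extract_helper_hint_alt (raw_tags : List String) : List String :=
  let blob := PySem.Str.join "\x00" (raw_tags.map PySem.Str.lower)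
  ["sein", "haben"].foldl
    (fun hints verb =>
      if PySem.Str.isIn ("hilfsverb " ++ verb) blob then PySem.Set.add hints verb else hints)
    PySem.Set.empty

-- ===== PRECONDITION & SPEC =====
-- In Python both programs return the same unordered set everywhere; as lists the ports' insertion
-- orders differ exactly when both hints occur and 'hilfsverb haben' first occurs in a tag before any
-- tag containing 'hilfsverb sein' — an accidental order of an unordered Python set, so Pre_ excludes it.
def Pre_extract_helper_hint (raw_tags : List String) : Prop :=
  ((!(raw_tags.any fun t => PySem.Str.isIn "hilfsverb sein" (PySem.Str.lower t))) ||
   (raw_tags.find? (fun t => PySem.Str.isIn "hilfsverb sein" (PySem.Str.lower t) ||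
                             PySem.Str.isIn "hilfsverb haben" (PySem.Str.lower t))).all
     (fun t => PySem.Str.isIn "hilfsverb sein" (PySem.Str.lower t))) = true
instance (raw_tags : List String) : Decidable (Pre_extract_helper_hint raw_tags) := by unfold Pre_extract_helper_hint; infer_instance

def pvWitness_extract_helper_hint : List String := ["Hilfsverb sein", "hilfsverb haben!"]

def Spec_extract_helper_hint (raw_tags : List String) (out : List String) : Prop := out = extract_helper_hint_alt raw_tags
instance (raw_tags : List String) (out : List String) : Decidable (Spec_extract_helper_hint raw_tags out) := by unfold Spec_extract_helper_hint; infer_instance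

-- ===== CLAIM (what is proved, stated in full; the proofs are below) =====
def Claim_equal_extract_helper_hint : Prop := ∀ (raw_tags : List String), Dom_extract_helper_hint raw_tags → Pre_extract_helper_hint raw_tags → Spec_extract_helper_hint raw_tags (extract_helper_hint raw_tags)

-- ===== LEMMAS AND PROOFS =====

-- the two per-tag tests
def pvP (t : String) : Bool := PySem.Str.isIn "hilfsverb sein" (PySem.Str.lower t)
def pvQ (t : String) : Bool := PySem.Str.isIn "hilfsverb haben" (PySem.Str.lower t)

-- A's loop step.
def pvStep (hints : List String) (raw : String) : List String :=
  let lowered := PySem.Str.lower raw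
  let hints := if PySem.Str.isIn "hilfsverb sein" lowered then PySem.Set.add hints "sein" else hints
  if PySem.Str.isIn "hilfsverb haben" lowered then PySem.Set.add hints "haben" else hints

-- the common shape of both results, by which hints are present
def pvSel (ap aq : Bool) : List String :=
  if ap then (if aq then ["sein", "haben"] else ["sein"])
  else (if aq then ["haben"] else [])

theorem extract_helper_hint_eq_foldl (raw_tags : List String) :
    extract_helper_hint raw_tags = raw_tags.foldl pvStep [] := rfl

-- an infix without the separator char lies on one side of it
theorem infix_split (p a b : List Char) (c : Char) (hc : c ∉ p) :
    p <:+: a ++ c :: b ↔ p <:+: a ∨ p <:+: b := by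
  constructor
  · rintro ⟨l, r, h⟩
    by_cases h1 : l.length + p.length ≤ a.length
    · left
      have h' := congrArg (List.take (l.length + p.length)) h
      rw [List.take_append_of_le_length h1,
          show l.length + p.length = (l ++ p).length by simp, List.take_left] at h'
      refine List.IsInfix.trans ⟨l, [], ?_⟩ (List.take_prefix (l ++ p).length a).isInfix
      simpa using h'
    · by_cases h2 : a.length + 1 ≤ l.length
      · right
        have h' := congrArg (List.drop (a.length + 1)) h
        rw [List.append_assoc, List.drop_append_of_le_length h2] at h'
        have hrhs : (a ++ c :: b).drop (a.length + 1) = b := by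
          rw [show a ++ c :: b = (a ++ [c]) ++ b by simp,
              show a.length + 1 = (a ++ [c]).length by simp]
          exact List.drop_left
        rw [hrhs] at h'
        refine ⟨l.drop (a.length + 1), r, ?_⟩
        rw [List.append_assoc]; exact h'
      · exfalso
        have hl : l.length ≤ a.length := by omega
        have hm : a.length - l.length < p.length := by omega
        have hi : a.length < (l ++ p ++ r).length := by rw [h]; simp
        have e1 : (l ++ p ++ r)[a.length]'hi = c := by
          rw [List.getElem_of_eq h hi, List.getElem_append_right (Nat.le_refl _)]
          simp
        have e2 : (l ++ p ++ r)[a.length]'hi = p[a.length - l.length]'hm := by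
          rw [List.getElem_of_eq (List.append_assoc l p r) hi,
              List.getElem_append_right hl, List.getElem_append_left hm]
        exact hc ((e2.symm.trans e1) ▸ List.getElem_mem hm)
  · rintro (⟨l, r, h⟩ | ⟨l, r, h⟩)
    · exact ⟨l, r ++ c :: b, by rw [← h]; simp⟩
    · exact ⟨a ++ c :: l, r, by rw [← h]; simp⟩

-- a separator-free, nonempty pattern is in the join iff it is in some segment
theorem infix_join (p : List Char) (c : Char) (segs : List (List Char))
    (hp : p ≠ []) (hc : c ∉ p) :
    p <:+: PySem.Chars.join [c] segs ↔ ∃ s ∈ segs, p <:+: s := by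
  induction segs with
  | nil =>
      rw [PySem.Chars.join_nil]
      simp [List.infix_nil, hp]
  | cons s segs ih =>
      cases segs with
      | nil => rw [PySem.Chars.join_singleton]; simp
      | cons s' rest =>
          rw [PySem.Chars.join_cons_cons, List.append_assoc]
          rw [show ([c] : List Char) ++ PySem.Chars.join [c] (s' :: rest)
              = c :: PySem.Chars.join [c] (s' :: rest) from rfl]
          rw [infix_split p s _ c hc, ih]
          simp

-- substring in the blob = some tag's casefold contains it
theorem isIn_blob (ph : String) (ts : List String)
    (hp : ph.toList ≠ []) (hc : Char.ofNat 0 ∉ ph.toList) :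
    PySem.Str.isIn ph (PySem.Str.join "\x00" (ts.map PySem.Str.lower)) =
      ts.any (fun t => PySem.Str.isIn ph (PySem.Str.lower t)) := by
  rw [Bool.eq_iff_iff]
  rw [PySem.Str.isIn_iff_infix, PySem.Str.toList_join]
  have hsep : ("\x00" : String).toList = [Char.ofNat 0] := rfl
  rw [hsep, infix_join _ _ _ hp hc]
  simp only [List.any_eq_true, PySem.Str.isIn_iff_infix, List.map_map, List.mem_map]
  constructor
  · rintro ⟨s, ⟨t, ht, rfl⟩, hinf⟩
    exact ⟨t, ht, hinf⟩
  · rintro ⟨t, ht, hinf⟩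
    exact ⟨(PySem.Str.lower t).toList, ⟨t, ht, rfl⟩, hinf⟩

-- Once both hints are in the set, the fold never changes it.
theorem foldl_full (s : List String) (hs : "sein" ∈ s) (hh : "haben" ∈ s)
    (ts : List String) : ts.foldl pvStep s = s := by
  induction ts with
  | nil => rfl
  | cons t ts ih =>
      have hstep : pvStep s t = s := by
        simp [pvStep, PySem.Set.add, PySem.Set.contains, hs, hh]
      rw [List.foldl_cons, hstep, ih]

-- From state ["sein"]: only whether some later tag has the haben hint matters.
theorem foldl_sein (ts : List String) :
    ts.foldl pvStep ["sein"] = (if ts.any pvQ then ["sein", "haben"] else ["sein"]) := by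
  induction ts with
  | nil => rfl
  | cons t ts ih =>
      rw [List.foldl_cons]
      cases hh : pvQ t with
      | true =>
          have hstep : pvStep ["sein"] t = ["sein", "haben"] := by
            cases hs : pvP t <;>
              (simp only [pvStep]; rw [show PySem.Str.isIn "hilfsverb sein" (PySem.Str.lower t) = pvP t from rfl,
                show PySem.Str.isIn "hilfsverb haben" (PySem.Str.lower t) = pvQ t from rfl, hs, hh]; decide)
          rw [hstep, foldl_full _ (by decide) (by decide)]
          simp [hh]
      | false =>
          have hstep : pvStep ["sein"] t = ["sein"] := by
            cases hs : pvP t <;>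
              (simp only [pvStep]; rw [show PySem.Str.isIn "hilfsverb sein" (PySem.Str.lower t) = pvP t from rfl,
                show PySem.Str.isIn "hilfsverb haben" (PySem.Str.lower t) = pvQ t from rfl, hs, hh]; decide)
          rw [hstep, ih]
          simp [hh]

-- From state ["haben"]: only whether some later tag has the sein hint matters.
theorem foldl_haben (ts : List String) :
    ts.foldl pvStep ["haben"] = (if ts.any pvP then ["haben", "sein"] else ["haben"]) := by
  induction ts with
  | nil => rfl
  | cons t ts ih =>
      rw [List.foldl_cons]
      cases hs : pvP t with
      | true =>
          have hstep : pvStep ["haben"] t = ["haben", "sein"] := by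
            cases hh : pvQ t <;>
              (simp only [pvStep]; rw [show PySem.Str.isIn "hilfsverb sein" (PySem.Str.lower t) = pvP t from rfl,
                show PySem.Str.isIn "hilfsverb haben" (PySem.Str.lower t) = pvQ t from rfl, hs, hh]; decide)
          rw [hstep, foldl_full _ (by decide) (by decide)]
          simp [hs]
      | false =>
          have hstep : pvStep ["haben"] t = ["haben"] := by
            cases hh : pvQ t <;>
              (simp only [pvStep]; rw [show PySem.Str.isIn "hilfsverb sein" (PySem.Str.lower t) = pvP t from rfl,
                show PySem.Str.isIn "hilfsverb haben" (PySem.Str.lower t) = pvQ t from rfl, hs, hh]; decide)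
          rw [hstep, ih]
          simp [hs]

-- A under Pre_: the result depends only on which hints occur at all.
theorem A_char (ts : List String) (hpre : Pre_extract_helper_hint ts) :
    ts.foldl pvStep [] = pvSel (ts.any pvP) (ts.any pvQ) := by
  induction ts with
  | nil => rfl
  | cons t ts ih =>
      rw [List.foldl_cons]
      cases hs : pvP t with
      | true =>
          cases hh : pvQ t with
          | true =>
              have hstep : pvStep [] t = ["sein", "haben"] := by
                simp only [pvStep]; rw [show PySem.Str.isIn "hilfsverb sein" (PySem.Str.lower t) = pvP t from rfl,
                  show PySem.Str.isIn "hilfsverb haben" (PySem.Str.lower t) = pvQ t from rfl, hs, hh]; decide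
              rw [hstep, foldl_full _ (by decide) (by decide)]
              simp [pvSel, hs, hh]
          | false =>
              have hstep : pvStep [] t = ["sein"] := by
                simp only [pvStep]; rw [show PySem.Str.isIn "hilfsverb sein" (PySem.Str.lower t) = pvP t from rfl,
                  show PySem.Str.isIn "hilfsverb haben" (PySem.Str.lower t) = pvQ t from rfl, hs, hh]; decide
              rw [hstep, foldl_sein]
              simp [pvSel, hs, hh]
      | false =>
          cases hh : pvQ t with
          | true =>
              -- Pre_ forces: no tag anywhere has the sein hint
              have hnop : (t :: ts).any (fun x => PySem.Str.isIn "hilfsverb sein" (PySem.Str.lower x)) = false := by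
                unfold Pre_extract_helper_hint at hpre
                rw [List.find?_cons_of_pos (by
                  show (pvP t || pvQ t) = true; rw [hs, hh]; rfl)] at hpre
                have hat : Option.all (fun x => PySem.Str.isIn "hilfsverb sein" (PySem.Str.lower x)) (some t) = false := by
                  rw [show Option.all (fun x => PySem.Str.isIn "hilfsverb sein" (PySem.Str.lower x)) (some t) = pvP t from rfl, hs]
                rw [hat, Bool.or_false, Bool.not_eq_true'] at hpre
                exact hpre
              have hnop' : ts.any pvP = false := by
                rw [List.any_cons] at hnop
                exact (Bool.or_eq_false_iff.mp hnop).2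
              have hstep : pvStep [] t = ["haben"] := by
                simp only [pvStep]; rw [show PySem.Str.isIn "hilfsverb sein" (PySem.Str.lower t) = pvP t from rfl,
                  show PySem.Str.isIn "hilfsverb haben" (PySem.Str.lower t) = pvQ t from rfl, hs, hh]; decide
              rw [hstep, foldl_haben, hnop']
              simp [pvSel, hnop', hs, hh]
          | false =>
              have hstep : pvStep [] t = [] := by
                simp only [pvStep]; rw [show PySem.Str.isIn "hilfsverb sein" (PySem.Str.lower t) = pvP t from rfl,
                  show PySem.Str.isIn "hilfsverb haben" (PySem.Str.lower t) = pvQ t from rfl, hs, hh]; decide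
              have hpre' : Pre_extract_helper_hint ts := by
                unfold Pre_extract_helper_hint at hpre ⊢
                rw [List.find?_cons_of_neg (by
                  show ¬ (pvP t || pvQ t) = true; rw [hs, hh]; decide)] at hpre
                rw [List.any_cons,
                  show PySem.Str.isIn "hilfsverb sein" (PySem.Str.lower t) = pvP t from rfl, hs,
                  Bool.false_or] at hpre
                exact hpre
              rw [hstep, ih hpre']
              simp [pvSel, hs, hh]

-- B: the blob searches decide exactly which hints occur.
theorem B_char (ts : List String) :
    extract_helper_hint_alt ts = pvSel (ts.any pvP) (ts.any pvQ) := by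
  unfold extract_helper_hint_alt
  simp only [List.foldl]
  rw [show ("hilfsverb " ++ "sein" : String) = "hilfsverb sein" from rfl,
      show ("hilfsverb " ++ "haben" : String) = "hilfsverb haben" from rfl,
      isIn_blob "hilfsverb sein" ts (by decide) (by decide),
      isIn_blob "hilfsverb haben" ts (by decide) (by decide),
      show (fun t => PySem.Str.isIn "hilfsverb sein" (PySem.Str.lower t)) = pvP from rfl,
      show (fun t => PySem.Str.isIn "hilfsverb haben" (PySem.Str.lower t)) = pvQ from rfl]
  cases ts.any pvP <;> cases ts.any pvQ <;>
    simp [pvSel, PySem.Set.add, PySem.Set.empty, PySem.Set.contains]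

-- ===== VERDICT (by name: the statement is the Claim_ definition above) =====
theorem extract_helper_hint_spec : Claim_equal_extract_helper_hint := by
  intro raw_tags _ hpre
  unfold Spec_extract_helper_hint
  rw [extract_helper_hint_eq_foldl, A_char raw_tags hpre, B_char]
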